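-- pv_equiv track=rewrite | github.com/RokyB3/TGNEncoding | hospital_data_less_tp/hospital_encoding3_textual.py | textual_adjacency_encoding
-- ===== SOURCE A (Python) =====
-- def textual_adjacency_encoding(tgn):
--     adjacency_history = {}
--
--     for t, snapshot in enumerate(tgn):
--         edges = snapshot["edges"]
--         for u, v in edges:
--             for src, tgt in [(u, v), (v, u)]:
--                 if src not in adjacency_history:
--                     adjacency_history[src] = {}
--                 if tgt not in adjacency_history[src]:
--                     adjacency_history[src][tgt] = {"added": t, "removed": None}
--
--         for u, v in snapshot.get("removed_edges", []):
--             for src, tgt in [(u, v), (v, u)]: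
--                 if src in adjacency_history and tgt in adjacency_history[src]:
--                     adjacency_history[src][tgt]["removed"] = t
--
--     output = "Each node's connections over time:\n\n"
--     for node in sorted(adjacency_history.keys()):
--         output += f"Node {node}:\n"
--         for neighbor in sorted(adjacency_history[node].keys()):
--             times = adjacency_history[node][neighbor]
--             line = f"  - Connected to {neighbor} at t={times['added']}"
--             if times["removed"] is not None:
--                 line += f", disconnected at t={times['removed']}"
--             output += line + "\n"
--         output += "\n"
--
--     return output
-- ===== SOURCE B (Python) =====
-- def textual_adjacency_encoding(tgn):
--     n = len(tgn)
--
--     def edge_pairs(t):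
--         return [p for (u, v) in tgn[t]["edges"] for p in ((u, v), (v, u))]
--
--     def removed_pairs(t):
--         return [p for (u, v) in tgn[t].get("removed_edges", []) for p in ((u, v), (v, u))]
--
--     def first_added(pair):
--         return next(t for t in range(n) if pair in edge_pairs(t))
--
--     def last_removed(pair, a):
--         return max((t for t in range(n) if t >= a and pair in removed_pairs(t)), default=None)
--
--     nodes = sorted({u for t in range(n) for (u, _) in edge_pairs(t)})
--     out = ["Each node's connections over time:\n"]
--     for node in nodes:
--         out.append(f"Node {node}:")
--         nbrs = sorted({v for t in range(n) for (u, v) in edge_pairs(t) if u == node})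
--         for nb in nbrs:
--             a = first_added((node, nb))
--             r = last_removed((node, nb), a)
--             line = f"  - Connected to {nb} at t={a}"
--             if r is not None:
--                 line += f", disconnected at t={r}"
--             out.append(line)
--         out.append("")
--     return "\n".join(out) + "\n"
-- ===== Notes on version B (the rewrite author's own statement) =====
-- stated objective: alternative
-- what changed: A threads one mutated nested dict-of-dicts through the timeline (first-insert wins for 'added', in-place overwrite for 'removed'); B instead computes each directed pair's first addition time and last qualifying (>= addition) removal time by closed-form scans over the snapshot range, takes sorted node/neighbor sets from comprehensions, and assembles the report with a '\n'.join of collected lines.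
import Mathlib
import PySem

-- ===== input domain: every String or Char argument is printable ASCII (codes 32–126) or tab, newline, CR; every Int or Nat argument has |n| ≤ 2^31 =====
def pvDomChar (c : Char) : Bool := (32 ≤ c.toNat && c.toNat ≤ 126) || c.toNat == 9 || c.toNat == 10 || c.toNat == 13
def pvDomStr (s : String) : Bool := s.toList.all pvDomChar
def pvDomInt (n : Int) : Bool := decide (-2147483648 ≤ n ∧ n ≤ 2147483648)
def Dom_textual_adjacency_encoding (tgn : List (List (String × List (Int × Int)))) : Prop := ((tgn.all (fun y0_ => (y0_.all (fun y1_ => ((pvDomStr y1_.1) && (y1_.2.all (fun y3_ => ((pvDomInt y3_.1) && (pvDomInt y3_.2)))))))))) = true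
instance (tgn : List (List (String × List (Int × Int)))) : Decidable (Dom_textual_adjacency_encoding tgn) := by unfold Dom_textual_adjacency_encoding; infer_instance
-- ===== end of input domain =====

-- B replaces A's incrementally-mutated nested dict-of-dicts by closed-form scans per directed
-- pair (first addition time, last qualifying removal time) and a "\n".join of collected lines;
-- objective: alternative (same cost class, no dict state threaded through the timeline).

-- ===== PORT A =====
-- A's adjacency_history : dict node -> dict neighbor -> {"added": t, "removed": t|None},
-- ported as PySem.Dict Int (PySem.Dict Int (Int × Option Int)).
-- snapshot["edges"] raises KeyError when absent: Pre_ excludes that; the `.getD []` below is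
-- only reached outside Pre_.

def pvDirsA (e : Int × Int) : List (Int × Int) := [(e.1, e.2), (e.2, e.1)]

def pvAddStep (t : Int) (h : PySem.Dict Int (PySem.Dict Int (Int × Option Int))) (q : Int × Int) :
    PySem.Dict Int (PySem.Dict Int (Int × Option Int)) :=
  let h := if h.contains q.1 then h else h.insert q.1 PySem.Dict.empty
  let inner := h.getD q.1 PySem.Dict.empty
  if inner.contains q.2 then h else h.insert q.1 (inner.insert q.2 (t, none))

def pvRemStep (t : Int) (h : PySem.Dict Int (PySem.Dict Int (Int × Option Int))) (q : Int × Int) :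
    PySem.Dict Int (PySem.Dict Int (Int × Option Int)) :=
  if h.contains q.1 && (h.getD q.1 PySem.Dict.empty).contains q.2 then
    h.insert q.1 ((h.getD q.1 PySem.Dict.empty).modify q.2 (0, none) (fun ar => (ar.1, some t)))
  else h

def pvHistory (tgn : List (List (String × List (Int × Int)))) :
    PySem.Dict Int (PySem.Dict Int (Int × Option Int)) :=
  (PySem.List.enumerate tgn 0).foldl (fun h ts =>
    let t := ts.1
    let edges := ((PySem.Dict.mk ts.2).get? "edges").getD []
    let h := edges.foldl (fun h e => (pvDirsA e).foldl (pvAddStep t) h) h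
    let removed := ((PySem.Dict.mk ts.2).get? "removed_edges").getD []
    removed.foldl (fun h e => (pvDirsA e).foldl (pvRemStep t) h) h) PySem.Dict.empty

def textual_adjacency_encoding (tgn : List (List (String × List (Int × Int)))) : String :=
  let hist := pvHistory tgn
  (PySem.List.sorted hist.keys (fun x => x) false).foldl (fun out node =>
    let inner := hist.getD node PySem.Dict.empty
    let out := out ++ "Node " ++ PySem.Int.toStr node ++ ":\n"
    let out := (PySem.List.sorted inner.keys (fun x => x) false).foldl (fun out nb =>
      let times := inner.getD nb (0, none)
      let line := "  - Connected to " ++ PySem.Int.toStr nb ++ " at t=" ++ PySem.Int.toStr times.1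
      let line := match times.2 with
        | some r => line ++ ", disconnected at t=" ++ PySem.Int.toStr r
        | none => line
      out ++ line ++ "\n") out
    out ++ "\n") "Each node's connections over time:\n\n"

-- ===== PORT B =====

def pvPairsOf (es : List (Int × Int)) : List (Int × Int) :=
  es.flatMap (fun e => [(e.1, e.2), (e.2, e.1)])

def pvEdgesB (tgn : List (List (String × List (Int × Int)))) (t : Int) : List (Int × Int) :=
  pvPairsOf (((PySem.Dict.mk (PySem.List.pyGetD tgn t [])).get? "edges").getD [])

def pvRemovedB (tgn : List (List (String × List (Int × Int)))) (t : Int) : List (Int × Int) :=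
  pvPairsOf (((PySem.Dict.mk (PySem.List.pyGetD tgn t [])).get? "removed_edges").getD [])

-- first t with pair among the directed edge pairs of snapshot t (Source B's next(...); only
-- evaluated on pairs that do occur, so the generator is never exhausted there)
def pvFirstAdded (tgn : List (List (String × List (Int × Int)))) (pair : Int × Int) : Option Int :=
  ((PySem.List.pyRange 0 tgn.length 1).filter (fun t => decide (pair ∈ pvEdgesB tgn t))).head?

-- max(t >= a with pair removed at t, default=None)
def pvLastRemoved (tgn : List (List (String × List (Int × Int)))) (pair : Int × Int) (a : Int) :
    Option Int :=
  PySem.List.max?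
    ((PySem.List.pyRange 0 tgn.length 1).filter
      (fun t => decide (a ≤ t) && decide (pair ∈ pvRemovedB tgn t)))
    (fun x => x)

def pvNodesB (tgn : List (List (String × List (Int × Int)))) : List Int :=
  PySem.List.sorted
    (PySem.Set.ofList ((PySem.List.pyRange 0 tgn.length 1).flatMap
      (fun t => (pvEdgesB tgn t).map (·.1))))
    (fun x => x) false

def pvNbrsB (tgn : List (List (String × List (Int × Int)))) (node : Int) : List Int :=
  PySem.List.sorted
    (PySem.Set.ofList ((PySem.List.pyRange 0 tgn.length 1).flatMap
      (fun t => ((pvEdgesB tgn t).filter (fun p => p.1 == node)).map (·.2))))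
    (fun x => x) false

def textual_adjacency_encoding_alt (tgn : List (List (String × List (Int × Int)))) : String :=
  let lines := (pvNodesB tgn).foldl (fun out node =>
    let out := out ++ ["Node " ++ PySem.Int.toStr node ++ ":"]
    let out := (pvNbrsB tgn node).foldl (fun out nb =>
      let a := (pvFirstAdded tgn (node, nb)).getD 0
      let line := "  - Connected to " ++ PySem.Int.toStr nb ++ " at t=" ++ PySem.Int.toStr a
      let line := match pvLastRemoved tgn (node, nb) a with
        | some r => line ++ ", disconnected at t=" ++ PySem.Int.toStr r
        | none => line
      out ++ [line]) out
    out ++ [""]) ["Each node's connections over time:\n"]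
  PySem.Str.join "\n" lines ++ "\n"

-- ===== PRECONDITION & SPEC =====
-- Pre_ excludes exactly the snapshots without an "edges" key, on which A raises KeyError
-- (B raises there too).
def Pre_textual_adjacency_encoding (tgn : List (List (String × List (Int × Int)))) : Prop :=
  ∀ snap ∈ tgn, (PySem.Dict.mk snap).contains "edges" = true
instance (tgn : List (List (String × List (Int × Int)))) : Decidable (Pre_textual_adjacency_encoding tgn) := by unfold Pre_textual_adjacency_encoding; infer_instance

def pvWitness_textual_adjacency_encoding : (List (List (String × List (Int × Int)))) :=
  [[("edges", [(1, 2)])], [("edges", []), ("removed_edges", [(1, 2)])]]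

def Spec_textual_adjacency_encoding (tgn : List (List (String × List (Int × Int)))) (out : String) : Prop := out = textual_adjacency_encoding_alt tgn
instance (tgn : List (List (String × List (Int × Int)))) (out : String) : Decidable (Spec_textual_adjacency_encoding tgn out) := by unfold Spec_textual_adjacency_encoding; infer_instance

-- ===== CLAIM (what is proved, stated in full; the proofs are below) =====
def Claim_equal_textual_adjacency_encoding : Prop := ∀ (tgn : List (List (String × List (Int × Int)))), Dom_textual_adjacency_encoding tgn → Pre_textual_adjacency_encoding tgn → Spec_textual_adjacency_encoding tgn (textual_adjacency_encoding tgn)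

-- ===== LEMMAS AND PROOFS =====


-- proof-side helpers: a closed-form reading of A's nested history dict

def histGet (h : PySem.Dict Int (PySem.Dict Int (Int × Option Int))) (s g : Int) :
    Option (Int × Option Int) :=
  if h.contains s && (h.getD s PySem.Dict.empty).contains g then
    some ((h.getD s PySem.Dict.empty).getD g (0, none))
  else none

-- first addition time among snapshots 0..k-1
def fAddK (tgn : List (List (String × List (Int × Int)))) (k : Int) (pair : Int × Int) :
    Option Int :=
  ((PySem.List.pyRange 0 k 1).filter (fun t => decide (pair ∈ pvEdgesB tgn t))).head?

-- last removal time ≥ a among snapshots 0..k-1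
def lRemK (tgn : List (List (String × List (Int × Int)))) (k : Int) (pair : Int × Int) (a : Int) :
    Option Int :=
  PySem.List.max?
    ((PySem.List.pyRange 0 k 1).filter
      (fun t => decide (a ≤ t) && decide (pair ∈ pvRemovedB tgn t)))
    (fun x => x)

def HInv (tgn : List (List (String × List (Int × Int)))) (k : Int)
    (h : PySem.Dict Int (PySem.Dict Int (Int × Option Int))) : Prop :=
  h.keys.Nodup ∧ (∀ s, (h.getD s PySem.Dict.empty).keys.Nodup) ∧
  (∀ s, h.contains s = true ↔ ∃ g, fAddK tgn k (s, g) ≠ none) ∧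
  (∀ s g, histGet h s g = (fAddK tgn k (s, g)).map (fun a => (a, lRemK tgn k (s, g) a)))

-- mid-snapshot state: additions of snapshot k processed for the pair-prefix D
def MidA (tgn : List (List (String × List (Int × Int)))) (k : Int) (D : List (Int × Int))
    (h : PySem.Dict Int (PySem.Dict Int (Int × Option Int))) : Prop :=
  h.keys.Nodup ∧ (∀ s, (h.getD s PySem.Dict.empty).keys.Nodup) ∧
  (∀ s, h.contains s = true ↔ ∃ g, (fAddK tgn k (s, g) ≠ none ∨ (s, g) ∈ D)) ∧
  (∀ s g, histGet h s g = match fAddK tgn k (s, g) with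
      | some a => some (a, lRemK tgn k (s, g) a)
      | none => if (s, g) ∈ D then some (k, none) else none)

-- mid-snapshot state: all additions of snapshot k done, removals processed for prefix Q
def MidR (tgn : List (List (String × List (Int × Int)))) (k : Int) (Q : List (Int × Int))
    (h : PySem.Dict Int (PySem.Dict Int (Int × Option Int))) : Prop :=
  h.keys.Nodup ∧ (∀ s, (h.getD s PySem.Dict.empty).keys.Nodup) ∧
  (∀ s, h.contains s = true ↔ ∃ g, fAddK tgn (k + 1) (s, g) ≠ none) ∧
  (∀ s g, histGet h s g = (fAddK tgn (k + 1) (s, g)).map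
      (fun a => (a, if (s, g) ∈ Q then some k else lRemK tgn k (s, g) a)))

theorem fAdd_bounds {tgn : List (List (String × List (Int × Int)))} {k a : Int}
    {pair : Int × Int} (h : fAddK tgn k pair = some a) : 0 ≤ a ∧ a < k := by
  unfold fAddK at h
  have hmem := List.mem_of_mem_filter (List.mem_of_mem_head? h)
  exact (PySem.List.mem_pyRange_one).mp hmem

theorem fAdd_ne_none_iff (tgn : List (List (String × List (Int × Int)))) (k : Int)
    (pair : Int × Int) :
    fAddK tgn k pair ≠ none ↔ ∃ t : Int, 0 ≤ t ∧ t < k ∧ pair ∈ pvEdgesB tgn t := by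
  unfold fAddK
  rw [Ne, List.head?_eq_none_iff]
  constructor
  · intro hne
    obtain ⟨t, ht⟩ := List.exists_mem_of_ne_nil _ hne
    have h1 := List.mem_of_mem_filter ht
    have h2 := List.of_mem_filter ht
    rw [PySem.List.mem_pyRange_one] at h1
    exact ⟨t, h1.1, h1.2, by simpa using h2⟩
  · rintro ⟨t, h0, h1, h2⟩ hnil
    have : t ∈ (PySem.List.pyRange 0 k 1).filter (fun t => decide (pair ∈ pvEdgesB tgn t)) := by
      rw [List.mem_filter]
      exact ⟨(PySem.List.mem_pyRange_one).mpr ⟨h0, h1⟩, by simpa using h2⟩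
    simp [hnil] at this

theorem fAdd_step (tgn : List (List (String × List (Int × Int)))) {k : Int} (hk : 0 ≤ k)
    (pair : Int × Int) :
    fAddK tgn (k + 1) pair =
      (fAddK tgn k pair).or (if pair ∈ pvEdgesB tgn k then some k else none) := by
  unfold fAddK
  rw [PySem.List.pyRange_one_succ_right hk, List.filter_append, List.head?_append]
  congr 1
  by_cases hmem : pair ∈ pvEdgesB tgn k <;> simp [hmem]

theorem max?_append_singleton (xs : List Int) (m : Int) (h : ∀ x ∈ xs, x ≤ m) :
    PySem.List.max? (xs ++ [m]) (fun x => x) = some m := by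
  cases hv : PySem.List.max? (xs ++ [m]) (fun x => x) with
  | none => rw [PySem.List.max?_eq_none_iff] at hv; simp at hv
  | some v =>
    have hvm := PySem.List.max?_mem hv
    have hmax := PySem.List.max?_isMax hv m (by simp)
    rcases List.mem_append.mp hvm with hx | hx
    · have := h v hx
      have : v = m := le_antisymm this hmax
      rw [this]
    · simp at hx; rw [hx]

theorem lRem_none_of_le (tgn : List (List (String × List (Int × Int)))) {k a : Int}
    (pair : Int × Int) (h : k ≤ a) : lRemK tgn k pair a = none := by
  unfold lRemK
  rw [PySem.List.max?_eq_none_iff]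
  rw [List.filter_eq_nil_iff]
  intro t ht
  rw [PySem.List.mem_pyRange_one] at ht
  simp only [Bool.and_eq_true, decide_eq_true_eq]
  rintro ⟨h1, -⟩
  omega

theorem lRem_step (tgn : List (List (String × List (Int × Int)))) {k a : Int} (hk : 0 ≤ k)
    (ha : a ≤ k) (pair : Int × Int) :
    lRemK tgn (k + 1) pair a =
      if pair ∈ pvRemovedB tgn k then some k else lRemK tgn k pair a := by
  unfold lRemK
  rw [PySem.List.pyRange_one_succ_right hk, List.filter_append]
  have hbound : ∀ x ∈ (PySem.List.pyRange 0 k 1).filter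
      (fun t => decide (a ≤ t) && decide (pair ∈ pvRemovedB tgn t)), x ≤ k := by
    intro x hx
    have := (PySem.List.mem_pyRange_one).mp (List.mem_of_mem_filter hx)
    omega
  by_cases hmem : pair ∈ pvRemovedB tgn k
  · have : List.filter (fun t => decide (a ≤ t) && decide (pair ∈ pvRemovedB tgn t)) [k]
        = [k] := by simp [ha, hmem]
    rw [this, max?_append_singleton _ _ hbound, if_pos hmem]
  · have : List.filter (fun t => decide (a ≤ t) && decide (pair ∈ pvRemovedB tgn t)) [k]
        = [] := by simp [hmem]
    rw [this, List.append_nil, if_neg hmem]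

theorem foldl_dirs (f : PySem.Dict Int (PySem.Dict Int (Int × Option Int)) → (Int × Int) →
      PySem.Dict Int (PySem.Dict Int (Int × Option Int)))
    (es : List (Int × Int)) (h : PySem.Dict Int (PySem.Dict Int (Int × Option Int))) :
    es.foldl (fun h e => (pvDirsA e).foldl f h) h = (pvPairsOf es).foldl f h := by
  induction es generalizing h with
  | nil => rfl
  | cons e es ih =>
    rw [show pvPairsOf (e :: es) = (e.1, e.2) :: (e.2, e.1) :: pvPairsOf es from rfl]
    simp only [List.foldl_cons]
    exact ih _

theorem addStep_mid {tgn : List (List (String × List (Int × Int)))} {k : Int}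
    {D : List (Int × Int)} {h : PySem.Dict Int (PySem.Dict Int (Int × Option Int))}
    (hm : MidA tgn k D h) (q : Int × Int) : MidA tgn k (D ++ [q]) (pvAddStep k h q) := by
  obtain ⟨h1, h2, h3, h4⟩ := hm
  by_cases hc : h.contains q.1 = true
  · by_cases hc2 : (h.getD q.1 PySem.Dict.empty).contains q.2 = true
    · -- pair already present: no change
      have hres : pvAddStep k h q = h := by simp [pvAddStep, hc, hc2]
      rw [hres]
      have hq : histGet h q.1 q.2 ≠ none := by simp [histGet, hc, hc2]
      rw [h4 q.1 q.2] at hq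
      have hqold : fAddK tgn k (q.1, q.2) ≠ none ∨ (q.1, q.2) ∈ D := by
        cases hv : fAddK tgn k (q.1, q.2) with
        | some a => exact Or.inl (by simp)
        | none =>
          rw [hv] at hq
          by_cases hd : (q.1, q.2) ∈ D
          · exact Or.inr hd
          · simp [hd] at hq
      refine ⟨h1, h2, ?_, ?_⟩
      · intro s
        rw [h3 s]
        constructor
        · rintro ⟨g, hg | hg⟩
          · exact ⟨g, Or.inl hg⟩
          · exact ⟨g, Or.inr (by simp [hg])⟩
        · rintro ⟨g, hg | hg⟩
          · exact ⟨g, Or.inl hg⟩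
          · rcases List.mem_append.mp hg with hg | hg
            · exact ⟨g, Or.inr hg⟩
            · have : (s, g) = q := by simpa using hg
              have hs : s = q.1 := by rw [← this]
              have hg2 : g = q.2 := by rw [← this]
              subst hs; subst hg2
              exact ⟨q.2, hqold⟩
      · intro s g
        rw [h4 s g]
        cases hv : fAddK tgn k (s, g) with
        | some a => rfl
        | none =>
          by_cases hd : (s, g) ∈ D
          · simp [hd]
          · by_cases heq : (s, g) = q
            · have : histGet h s g ≠ none := by
                rw [show s = q.1 from by rw [← heq], show g = q.2 from by rw [← heq]]
                simp [histGet, hc, hc2]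
              rw [h4 s g, hv] at this
              simp [hd] at this
            · simp [hd, heq]
    · -- src present, tgt new
      have hc2' : (h.getD q.1 PySem.Dict.empty).contains q.2 = false := by
        simpa using hc2
      have hres : pvAddStep k h q =
          h.insert q.1 ((h.getD q.1 PySem.Dict.empty).insert q.2 (k, none)) := by
        simp [pvAddStep, hc, hc2']
      rw [hres]
      have hq : histGet h q.1 q.2 = none := by simp [histGet, hc2']
      rw [h4 q.1 q.2] at hq
      have hfq : fAddK tgn k (q.1, q.2) = none ∧ (q.1, q.2) ∉ D := by
        cases hv : fAddK tgn k (q.1, q.2) with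
        | some a => rw [hv] at hq; simp at hq
        | none =>
          rw [hv] at hq
          refine ⟨rfl, ?_⟩
          by_cases hd : (q.1, q.2) ∈ D
          · simp [hd] at hq
          · exact hd
      refine ⟨?_, ?_, ?_, ?_⟩
      · rw [PySem.Dict.keys_insert_of_contains _ _ hc]; exact h1
      · intro s
        rw [PySem.Dict.getD_insert]
        split
        · exact PySem.Dict.nodup_keys_insert _ _ _ (h2 q.1)
        · exact h2 s
      · intro s
        rw [PySem.Dict.contains_insert]
        by_cases hs : s = q.1
        · subst hs
          simp only [BEq.rfl, Bool.true_or, true_iff]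
          exact ⟨q.2, Or.inr (by simp)⟩
        · rw [show (s == q.1) = false from by simpa using hs, Bool.false_or, h3 s]
          constructor
          · rintro ⟨g, hg | hg⟩
            · exact ⟨g, Or.inl hg⟩
            · exact ⟨g, Or.inr (by simp [hg])⟩
          · rintro ⟨g, hg | hg⟩
            · exact ⟨g, Or.inl hg⟩
            · rcases List.mem_append.mp hg with hg | hg
              · exact ⟨g, Or.inr hg⟩
              · exact absurd (by rw [← (show (s, g) = q from by simpa using hg)]) hs
      · intro s g
        by_cases hs : s = q.1
        · subst hs
          by_cases hg : g = q.2
          · subst hg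
            have hlhs : histGet (h.insert q.1 ((h.getD q.1 PySem.Dict.empty).insert q.2
                (k, none))) q.1 q.2 = some (k, none) := by
              simp [histGet, PySem.Dict.getD_insert_self,
                PySem.Dict.contains_insert_self]
            rw [hlhs, hfq.1]
            simp
          · have hlhs : histGet (h.insert q.1 ((h.getD q.1 PySem.Dict.empty).insert q.2
                (k, none))) q.1 g = histGet h q.1 g := by
              simp [histGet, PySem.Dict.contains_insert, PySem.Dict.getD_insert_self,
                PySem.Dict.getD_insert, hc, hg,
                show (g == q.2) = false from by simpa using hg]
            rw [hlhs, h4 q.1 g]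
            cases fAddK tgn k (q.1, g) with
            | some a => rfl
            | none =>
              have : ((q.1, g) ∈ D ++ [q]) ↔ ((q.1, g) ∈ D) := by
                simp only [List.mem_append, List.mem_singleton, or_iff_left_iff_imp]
                intro hcontr
                exact absurd (by rw [← hcontr]) hg
              simp only [this]
        · have hlhs : histGet (h.insert q.1 ((h.getD q.1 PySem.Dict.empty).insert q.2
              (k, none))) s g = histGet h s g := by
            simp only [histGet, PySem.Dict.contains_insert,
              show (s == q.1) = false from by simpa using hs, Bool.false_or]
            rw [PySem.Dict.getD_insert, if_neg hs]
          rw [hlhs, h4 s g]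
          cases fAddK tgn k (s, g) with
          | some a => rfl
          | none =>
            have : ((s, g) ∈ D ++ [q]) ↔ ((s, g) ∈ D) := by
              simp only [List.mem_append, List.mem_singleton, or_iff_left_iff_imp]
              intro hcontr
              exact absurd (by rw [← hcontr]) hs
            simp only [this]
  · -- src entirely new
    have hc' : h.contains q.1 = false := by simpa using hc
    have hres : pvAddStep k h q =
        h.insert q.1 (PySem.Dict.empty.insert q.2 (k, none)) := by
      simp [pvAddStep, hc', PySem.Dict.getD_insert_self, PySem.Dict.contains_empty,
        PySem.Dict.insert_insert_self]
    rw [hres]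
    have hno : ¬ ∃ g, (fAddK tgn k (q.1, g) ≠ none ∨ (q.1, g) ∈ D) := by
      rw [← h3]; simp [hc']
    push Not at hno
    refine ⟨?_, ?_, ?_, ?_⟩
    · rw [PySem.Dict.keys_insert_of_not_contains _ _ hc']
      refine List.Nodup.append h1 (by simp) ?_
      intro x hx hy
      have hx1 : x = q.1 := by simpa using hy
      subst hx1
      exact absurd ((PySem.Dict.contains_iff_mem_keys h _).mpr hx) (by simp [hc'])
    · intro s
      rw [PySem.Dict.getD_insert]
      split
      · exact PySem.Dict.nodup_keys_insert _ _ _ PySem.Dict.nodup_keys_empty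
      · exact h2 s
    · intro s
      rw [PySem.Dict.contains_insert]
      by_cases hs : s = q.1
      · subst hs
        simp only [BEq.rfl, Bool.true_or, true_iff]
        exact ⟨q.2, Or.inr (by simp)⟩
      · rw [show (s == q.1) = false from by simpa using hs, Bool.false_or, h3 s]
        constructor
        · rintro ⟨g, hg | hg⟩
          · exact ⟨g, Or.inl hg⟩
          · exact ⟨g, Or.inr (by simp [hg])⟩
        · rintro ⟨g, hg | hg⟩
          · exact ⟨g, Or.inl hg⟩
          · rcases List.mem_append.mp hg with hg | hg
            · exact ⟨g, Or.inr hg⟩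
            · exact absurd (by rw [← (show (s, g) = q from by simpa using hg)]) hs
    · intro s g
      by_cases hs : s = q.1
      · subst hs
        have hkey := hno g
        by_cases hg : g = q.2
        · subst hg
          have hlhs : histGet (h.insert q.1 (PySem.Dict.empty.insert q.2 (k, none))) q.1 q.2 =
              some (k, none) := by
            simp [histGet, PySem.Dict.getD_insert_self,
              PySem.Dict.contains_insert_self]
          rw [hlhs, hkey.1]
          simp
        · have hlhs : histGet (h.insert q.1 (PySem.Dict.empty.insert q.2 (k, none))) q.1 g =
              none := by
            simp [histGet, PySem.Dict.contains_insert, PySem.Dict.getD_insert_self,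
              PySem.Dict.contains_empty,
              show (g == q.2) = false from by simpa using hg]
          rw [hlhs, hkey.1]
          have : ((q.1, g) ∈ D ++ [q]) ↔ False := by
            simp only [List.mem_append, List.mem_singleton, iff_false]
            rintro (hd | hd)
            · exact hkey.2 hd
            · exact absurd (by rw [← hd]) hg
          simp only [this, if_false]
      · have hlhs : histGet (h.insert q.1 (PySem.Dict.empty.insert q.2 (k, none))) s g =
            histGet h s g := by
          simp only [histGet, PySem.Dict.contains_insert,
            show (s == q.1) = false from by simpa using hs, Bool.false_or]
          rw [PySem.Dict.getD_insert, if_neg hs]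
        rw [hlhs, h4 s g]
        cases fAddK tgn k (s, g) with
        | some a => rfl
        | none =>
          have : ((s, g) ∈ D ++ [q]) ↔ ((s, g) ∈ D) := by
            simp only [List.mem_append, List.mem_singleton, or_iff_left_iff_imp]
            intro hcontr
            exact absurd (by rw [← hcontr]) hs
          simp only [this]

theorem addFold_mid {tgn : List (List (String × List (Int × Int)))} {k : Int}
    (P : List (Int × Int)) {D : List (Int × Int)}
    {h : PySem.Dict Int (PySem.Dict Int (Int × Option Int))}
    (hm : MidA tgn k D h) : MidA tgn k (D ++ P) (P.foldl (pvAddStep k) h) := by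
  induction P generalizing D h with
  | nil => simpa using hm
  | cons p P ih =>
    have := ih (addStep_mid hm p)
    simpa [List.append_assoc] using this

theorem remStep_mid {tgn : List (List (String × List (Int × Int)))} {k : Int}
    {Q : List (Int × Int)} {h : PySem.Dict Int (PySem.Dict Int (Int × Option Int))}
    (hm : MidR tgn k Q h) (q : Int × Int) : MidR tgn k (Q ++ [q]) (pvRemStep k h q) := by
  obtain ⟨h1, h2, h3, h4⟩ := hm
  by_cases hc : (h.contains q.1 && (h.getD q.1 PySem.Dict.empty).contains q.2) = true
  · have hc1 : h.contains q.1 = true := by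
      rcases Bool.and_eq_true_iff.mp hc with ⟨a, -⟩; exact a
    have hc2 : (h.getD q.1 PySem.Dict.empty).contains q.2 = true := by
      rcases Bool.and_eq_true_iff.mp hc with ⟨-, b⟩; exact b
    have hres : pvRemStep k h q = h.insert q.1
        ((h.getD q.1 PySem.Dict.empty).modify q.2 (0, none) (fun ar => (ar.1, some k))) := by
      simp [pvRemStep, hc]
    rw [hres]
    have hqv : histGet h q.1 q.2 = some ((h.getD q.1 PySem.Dict.empty).getD q.2 (0, none)) := by
      simp [histGet, hc1, hc2]
    refine ⟨?_, ?_, ?_, ?_⟩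
    · rw [PySem.Dict.keys_insert_of_contains _ _ hc1]; exact h1
    · intro s
      rw [PySem.Dict.getD_insert]
      split
      · rw [show ((h.getD q.1 PySem.Dict.empty).modify q.2 (0, none)
            (fun ar => (ar.1, some k))).keys = _ from PySem.Dict.keys_modify _ _ _ _]
        exact PySem.Dict.nodup_keys_insert _ _ _ (h2 q.1)
      · exact h2 s
    · intro s
      rw [PySem.Dict.contains_insert]
      by_cases hs : s = q.1
      · subst hs
        simp only [BEq.rfl, Bool.true_or, true_iff]
        exact (h3 q.1).mp hc1
      · rw [show (s == q.1) = false from by simpa using hs, Bool.false_or]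
        exact h3 s
    · intro s g
      by_cases hs : s = q.1
      · subst hs
        by_cases hg : g = q.2
        · subst hg
          have hlhs : histGet (h.insert q.1 ((h.getD q.1 PySem.Dict.empty).modify q.2 (0, none)
              (fun ar => (ar.1, some k)))) q.1 q.2 =
              some (((h.getD q.1 PySem.Dict.empty).getD q.2 (0, none)).1, some k) := by
            simp [histGet, PySem.Dict.getD_insert_self,
              PySem.Dict.contains_modify, hc2, PySem.Dict.getD_modify_self]
          rw [hlhs]
          have hold := h4 q.1 q.2
          rw [hqv] at hold
          cases hv : fAddK tgn (k + 1) (q.1, q.2) with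
          | none => rw [hv] at hold; simp at hold
          | some a =>
            rw [hv] at hold
            simp only [Option.map_some, Option.some.injEq] at hold
            have ha : ((h.getD q.1 PySem.Dict.empty).getD q.2 (0, none)).1 = a := by
              rw [hold]
            rw [ha]
            simp
        · have hlhs : histGet (h.insert q.1 ((h.getD q.1 PySem.Dict.empty).modify q.2 (0, none)
              (fun ar => (ar.1, some k)))) q.1 g = histGet h q.1 g := by
            simp [histGet, PySem.Dict.getD_insert_self,
              PySem.Dict.contains_modify, PySem.Dict.getD_modify, hc1, hg,
              show (g == q.2) = false from by simpa using hg]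
          rw [hlhs, h4 q.1 g]
          have : ((q.1, g) ∈ Q ++ [q]) ↔ ((q.1, g) ∈ Q) := by
            simp only [List.mem_append, List.mem_singleton, or_iff_left_iff_imp]
            intro hcontr
            exact absurd (by rw [← hcontr]) hg
          simp only [this]
      · have hlhs : histGet (h.insert q.1 ((h.getD q.1 PySem.Dict.empty).modify q.2 (0, none)
            (fun ar => (ar.1, some k)))) s g = histGet h s g := by
          simp only [histGet, PySem.Dict.contains_insert,
            show (s == q.1) = false from by simpa using hs, Bool.false_or]
          rw [PySem.Dict.getD_insert, if_neg hs]
        rw [hlhs, h4 s g]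
        have : ((s, g) ∈ Q ++ [q]) ↔ ((s, g) ∈ Q) := by
          simp only [List.mem_append, List.mem_singleton, or_iff_left_iff_imp]
          intro hcontr
          exact absurd (by rw [← hcontr]) hs
        simp only [this]
  · have hres : pvRemStep k h q = h := by simp [pvRemStep, hc]
    rw [hres]
    have hqn : histGet h q.1 q.2 = none := by
      simp only [histGet]
      rw [if_neg]
      simpa using hc
    refine ⟨h1, h2, h3, ?_⟩
    intro s g
    rw [h4 s g]
    by_cases heq : (s, g) = q
    · have hs : s = q.1 := by rw [← heq]
      have hg : g = q.2 := by rw [← heq]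
      subst hs; subst hg
      have hold := h4 q.1 q.2
      rw [hqn] at hold
      cases hv : fAddK tgn (k + 1) (q.1, q.2) with
      | none => simp
      | some a => rw [hv] at hold; simp at hold
    · have : ((s, g) ∈ Q ++ [q]) ↔ ((s, g) ∈ Q) := by
        simp only [List.mem_append, List.mem_singleton, or_iff_left_iff_imp]
        intro hcontr
        exact absurd hcontr heq
      simp only [this]

theorem remFold_mid {tgn : List (List (String × List (Int × Int)))} {k : Int}
    (P : List (Int × Int)) {Q : List (Int × Int)}
    {h : PySem.Dict Int (PySem.Dict Int (Int × Option Int))}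
    (hm : MidR tgn k Q h) : MidR tgn k (Q ++ P) (P.foldl (pvRemStep k) h) := by
  induction P generalizing Q h with
  | nil => simpa using hm
  | cons p P ih =>
    have := ih (remStep_mid hm p)
    simpa [List.append_assoc] using this

theorem inv_to_midA {tgn : List (List (String × List (Int × Int)))} {k : Int}
    {h : PySem.Dict Int (PySem.Dict Int (Int × Option Int))}
    (hi : HInv tgn k h) : MidA tgn k [] h := by
  obtain ⟨h1, h2, h3, h4⟩ := hi
  refine ⟨h1, h2, by simpa using h3, ?_⟩
  intro s g
  rw [h4 s g]
  cases fAddK tgn k (s, g) <;> simp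

theorem midA_to_midR {tgn : List (List (String × List (Int × Int)))} {k : Int} (hk : 0 ≤ k)
    {h : PySem.Dict Int (PySem.Dict Int (Int × Option Int))}
    (hm : MidA tgn k (pvEdgesB tgn k) h) : MidR tgn k [] h := by
  obtain ⟨h1, h2, h3, h4⟩ := hm
  refine ⟨h1, h2, ?_, ?_⟩
  · intro s
    rw [h3 s]
    constructor
    · rintro ⟨g, hg⟩
      refine ⟨g, ?_⟩
      rw [fAdd_step tgn hk]
      rcases hg with hg | hg
      · cases hv : fAddK tgn k (s, g) with
        | none => exact absurd hv hg
        | some a => simp [Option.or]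
      · cases hv : fAddK tgn k (s, g) with
        | some a => simp [Option.or]
        | none => simp [Option.or, hg]
    · rintro ⟨g, hg⟩
      refine ⟨g, ?_⟩
      rw [fAdd_step tgn hk] at hg
      cases hv : fAddK tgn k (s, g) with
      | some a => exact Or.inl (by simp)
      | none =>
        rw [hv] at hg
        simp only [Option.or] at hg
        by_cases hmem : (s, g) ∈ pvEdgesB tgn k
        · exact Or.inr hmem
        · simp [hmem] at hg
  · intro s g
    rw [h4 s g, fAdd_step tgn hk]
    cases hv : fAddK tgn k (s, g) with
    | some a => simp [Option.or]
    | none =>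
      simp only [Option.or]
      by_cases hmem : (s, g) ∈ pvEdgesB tgn k
      · simp [hmem, lRem_none_of_le tgn (s, g) (le_refl k)]
      · simp [hmem]

theorem midR_to_inv {tgn : List (List (String × List (Int × Int)))} {k : Int} (hk : 0 ≤ k)
    {h : PySem.Dict Int (PySem.Dict Int (Int × Option Int))}
    (hm : MidR tgn k (pvRemovedB tgn k) h) : HInv tgn (k + 1) h := by
  obtain ⟨h1, h2, h3, h4⟩ := hm
  refine ⟨h1, h2, h3, ?_⟩
  intro s g
  rw [h4 s g]
  cases hv : fAddK tgn (k + 1) (s, g) with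
  | none => simp
  | some a =>
    have hb := fAdd_bounds hv
    simp only [Option.map_some]
    rw [lRem_step tgn hk (by omega) (s, g)]

theorem snap_inv {tgn : List (List (String × List (Int × Int)))} {k : Nat}
    {snap : List (String × List (Int × Int))}
    {h : PySem.Dict Int (PySem.Dict Int (Int × Option Int))}
    (hs : tgn[k]? = some snap) (hi : HInv tgn (k : Int) h) :
    HInv tgn ((k : Int) + 1)
      ((((PySem.Dict.mk snap).get? "edges").getD []).foldl
          (fun h e => (pvDirsA e).foldl (pvAddStep (k : Int)) h) h
        |> (fun h => (((PySem.Dict.mk snap).get? "removed_edges").getD []).foldl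
          (fun h e => (pvDirsA e).foldl (pvRemStep (k : Int)) h) h)) := by
  have hk0 : (0 : Int) ≤ (k : Int) := Int.natCast_nonneg k
  have hsnap : tgn.getD k [] = snap := by
    rw [List.getD_eq_getElem?_getD, hs]; rfl
  have hE : pvEdgesB tgn (k : Int) =
      pvPairsOf (((PySem.Dict.mk snap).get? "edges").getD []) := by
    unfold pvEdgesB
    rw [PySem.List.pyGetD_natCast, hsnap]
  have hR : pvRemovedB tgn (k : Int) =
      pvPairsOf (((PySem.Dict.mk snap).get? "removed_edges").getD []) := by
    unfold pvRemovedB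
    rw [PySem.List.pyGetD_natCast, hsnap]
  rw [show ((((PySem.Dict.mk snap).get? "edges").getD []).foldl
          (fun h e => (pvDirsA e).foldl (pvAddStep (k : Int)) h) h
        |> (fun h => (((PySem.Dict.mk snap).get? "removed_edges").getD []).foldl
          (fun h e => (pvDirsA e).foldl (pvRemStep (k : Int)) h) h)) =
      ((((PySem.Dict.mk snap).get? "removed_edges").getD []).foldl
        (fun h e => (pvDirsA e).foldl (pvRemStep (k : Int)) h)
        ((((PySem.Dict.mk snap).get? "edges").getD []).foldl
          (fun h e => (pvDirsA e).foldl (pvAddStep (k : Int)) h) h)) from rfl]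
  rw [foldl_dirs, foldl_dirs, ← hE, ← hR]
  exact midR_to_inv hk0 (by
    simpa using remFold_mid (pvRemovedB tgn (k : Int)) (midA_to_midR hk0 (by
      simpa using addFold_mid (pvEdgesB tgn (k : Int)) (inv_to_midA hi))))

theorem hinv_zero (tgn : List (List (String × List (Int × Int)))) : HInv tgn 0 PySem.Dict.empty := by
  have hf : ∀ pair, fAddK tgn 0 pair = none := by
    intro pair
    unfold fAddK
    rw [PySem.List.pyRange_one_eq_nil le_rfl]
    rfl
  refine ⟨by simp [PySem.Dict.keys_empty], ?_, ?_, ?_⟩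
  · intro s
    simp [PySem.Dict.getD_empty, PySem.Dict.keys_empty]
  · intro s
    simp [PySem.Dict.contains_empty, hf]
  · intro s g
    simp [histGet, PySem.Dict.contains_empty, hf]

theorem fold_all {tgn : List (List (String × List (Int × Int)))}
    (rest : List (List (String × List (Int × Int)))) (k : Nat)
    (h : PySem.Dict Int (PySem.Dict Int (Int × Option Int)))
    (hdrop : tgn.drop k = rest) (hk : k ≤ tgn.length) (hi : HInv tgn (k : Int) h) :
    HInv tgn (tgn.length : Int)
      ((PySem.List.enumerate rest (k : Int)).foldl (fun h ts =>
        let t := ts.1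
        let edges := ((PySem.Dict.mk ts.2).get? "edges").getD []
        let h := edges.foldl (fun h e => (pvDirsA e).foldl (pvAddStep t) h) h
        let removed := ((PySem.Dict.mk ts.2).get? "removed_edges").getD []
        removed.foldl (fun h e => (pvDirsA e).foldl (pvRemStep t) h) h) h) := by
  induction rest generalizing k h with
  | nil =>
    have hlen : tgn.length ≤ k := List.drop_eq_nil_iff.mp hdrop
    have : k = tgn.length := le_antisymm hk hlen
    subst this
    simpa using hi
  | cons snap rest' ih =>
    rw [PySem.List.enumerate_cons, List.foldl_cons]
    have hsk : tgn[k]? = some snap := by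
      have := congrArg List.head? hdrop
      rwa [List.head?_drop, List.head?_cons] at this
    have hdrop' : tgn.drop (k + 1) = rest' := by
      have h1 : tgn.drop (k + 1) = (tgn.drop k).drop 1 := by
        rw [List.drop_drop]
      rw [h1, hdrop, List.drop_one, List.tail_cons]
    have hklt : k < tgn.length := by
      by_contra hlt
      rw [List.drop_eq_nil_of_le (by omega)] at hdrop
      simp at hdrop
    have hstep := snap_inv hsk hi
    have hstep' : HInv tgn ((k + 1 : Nat) : Int)
        ((((PySem.Dict.mk snap).get? "edges").getD []).foldl
            (fun h e => (pvDirsA e).foldl (pvAddStep (k : Int)) h) h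
          |> (fun h => (((PySem.Dict.mk snap).get? "removed_edges").getD []).foldl
            (fun h e => (pvDirsA e).foldl (pvRemStep (k : Int)) h) h)) := by
      rw [show ((k + 1 : Nat) : Int) = (k : Int) + 1 by push_cast; ring]
      exact hstep
    have hrec := ih (k + 1) _ hdrop' (by omega) hstep'
    rw [show ((k : Int) + 1) = ((k + 1 : Nat) : Int) by push_cast; ring]
    exact hrec

theorem history_inv (tgn : List (List (String × List (Int × Int)))) :
    HInv tgn (tgn.length : Int) (pvHistory tgn) := by
  have := fold_all (tgn := tgn) tgn 0 PySem.Dict.empty (List.drop_zero) (Nat.zero_le _) (by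
    rw [show ((0 : Nat) : Int) = 0 from rfl]; exact hinv_zero tgn)
  simpa [pvHistory] using this

theorem nodes_eq {tgn : List (List (String × List (Int × Int)))}
    (hi : HInv tgn (tgn.length : Int) (pvHistory tgn)) :
    PySem.List.sorted (pvHistory tgn).keys (fun x => x) false = pvNodesB tgn := by
  obtain ⟨h1, h2, h3, h4⟩ := hi
  unfold pvNodesB
  apply PySem.List.sorted_eq_sorted_of_perm _ _ _ (fun a b hab => hab)
  apply (List.perm_ext_iff_of_nodup h1 (PySem.Set.nodup_ofList _)).mpr
  intro s
  rw [show (s ∈ (pvHistory tgn).keys) ↔ ((pvHistory tgn).contains s = true) from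
    (PySem.Dict.contains_iff_mem_keys _ _).symm, h3 s, PySem.Set.mem_ofList]
  simp only [List.mem_flatMap, List.mem_map]
  constructor
  · rintro ⟨g, hg⟩
    obtain ⟨t, ht0, htl, htm⟩ := (fAdd_ne_none_iff tgn _ _).mp hg
    exact ⟨t, PySem.List.mem_pyRange_one.mpr ⟨ht0, htl⟩, (s, g), htm, rfl⟩
  · rintro ⟨t, htr, p, hp, hps⟩
    refine ⟨p.2, (fAdd_ne_none_iff tgn _ _).mpr ⟨t, ?_, ?_, ?_⟩⟩
    · exact (PySem.List.mem_pyRange_one.mp htr).1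
    · exact (PySem.List.mem_pyRange_one.mp htr).2
    · rwa [show (s, p.2) = p from by rw [← hps]]

theorem nbrs_eq {tgn : List (List (String × List (Int × Int)))}
    (hi : HInv tgn (tgn.length : Int) (pvHistory tgn)) (node : Int) :
    PySem.List.sorted ((pvHistory tgn).getD node PySem.Dict.empty).keys (fun x => x) false =
      pvNbrsB tgn node := by
  obtain ⟨h1, h2, h3, h4⟩ := hi
  have hinner : ∀ g, (((pvHistory tgn).getD node PySem.Dict.empty).contains g = true) ↔
      fAddK tgn (tgn.length : Int) (node, g) ≠ none := by
    intro g
    by_cases hcn : (pvHistory tgn).contains node = true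
    · have hv := h4 node g
      constructor
      · intro hg
        rw [show histGet (pvHistory tgn) node g =
          some (((pvHistory tgn).getD node PySem.Dict.empty).getD g (0, none)) from by
            simp [histGet, hcn, hg]] at hv
        cases hf : fAddK tgn (tgn.length : Int) (node, g) with
        | some a => simp
        | none => rw [hf] at hv; simp at hv
      · intro hg
        cases hf : fAddK tgn (tgn.length : Int) (node, g) with
        | none => exact absurd hf hg
        | some a =>
          rw [hf] at hv
          by_cases hcg : ((pvHistory tgn).getD node PySem.Dict.empty).contains g = true
          · exact hcg
          · rw [show histGet (pvHistory tgn) node g = none from by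
              simp [histGet]
              intro _
              simpa using hcg] at hv
            simp at hv
    · have hemp : (pvHistory tgn).getD node PySem.Dict.empty = PySem.Dict.empty :=
        PySem.Dict.getD_of_not_contains _ _ (by simpa using hcn)
      rw [hemp, PySem.Dict.contains_empty]
      have hno : ¬ ∃ g, fAddK tgn (tgn.length : Int) (node, g) ≠ none := by
        rw [← h3 node]; simpa using hcn
      push Not at hno
      simp [hno g]
  unfold pvNbrsB
  apply PySem.List.sorted_eq_sorted_of_perm _ _ _ (fun a b hab => hab)
  apply (List.perm_ext_iff_of_nodup (h2 node) (PySem.Set.nodup_ofList _)).mpr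
  intro g
  rw [show (g ∈ ((pvHistory tgn).getD node PySem.Dict.empty).keys) ↔
      (((pvHistory tgn).getD node PySem.Dict.empty).contains g = true) from
    (PySem.Dict.contains_iff_mem_keys _ _).symm, hinner g, PySem.Set.mem_ofList]
  simp only [List.mem_flatMap, List.mem_map, List.mem_filter]
  constructor
  · rintro hg
    obtain ⟨t, ht0, htl, htm⟩ := (fAdd_ne_none_iff tgn _ _).mp hg
    exact ⟨t, PySem.List.mem_pyRange_one.mpr ⟨ht0, htl⟩, (node, g), ⟨htm, by simp⟩, rfl⟩
  · rintro ⟨t, htr, p, ⟨hp, hpn⟩, hps⟩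
    refine (fAdd_ne_none_iff tgn _ _).mpr ⟨t, ?_, ?_, ?_⟩
    · exact (PySem.List.mem_pyRange_one.mp htr).1
    · exact (PySem.List.mem_pyRange_one.mp htr).2
    · have hp1 : p.1 = node := by simpa using hpn
      rwa [show (node, g) = p from by rw [← hp1, ← hps]]

theorem times_eq {tgn : List (List (String × List (Int × Int)))}
    (hi : HInv tgn (tgn.length : Int) (pvHistory tgn)) {node nb : Int}
    (hnb : ((pvHistory tgn).getD node PySem.Dict.empty).contains nb = true)
    (hnode : (pvHistory tgn).contains node = true) :
    ((pvHistory tgn).getD node PySem.Dict.empty).getD nb (0, none) =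
      ((pvFirstAdded tgn (node, nb)).getD 0,
        pvLastRemoved tgn (node, nb) ((pvFirstAdded tgn (node, nb)).getD 0)) := by
  obtain ⟨h1, h2, h3, h4⟩ := hi
  have hg := h4 node nb
  rw [show histGet (pvHistory tgn) node nb =
    some (((pvHistory tgn).getD node PySem.Dict.empty).getD nb (0, none)) from by
      simp [histGet, hnode, hnb]] at hg
  have e1 : pvFirstAdded tgn (node, nb) = fAddK tgn (tgn.length : Int) (node, nb) := rfl
  have e2 : ∀ a, pvLastRemoved tgn (node, nb) a = lRemK tgn (tgn.length : Int) (node, nb) a :=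
    fun _ => rfl
  cases hv : fAddK tgn (tgn.length : Int) (node, nb) with
  | none => rw [hv] at hg; simp at hg
  | some a =>
    rw [hv] at hg
    simp only [Option.map_some, Option.some.injEq] at hg
    rw [e1, hv, e2, hg]
    simp

theorem charsJoinAppend (sep : List Char) (L : List (List Char)) (x : List Char) (h : L ≠ []) :
    PySem.Chars.join sep (L ++ [x]) = PySem.Chars.join sep L ++ sep ++ x := by
  induction L with
  | nil => simp at h
  | cons a as ih =>
    cases as with
    | nil => simp [PySem.Chars.join, List.intercalate, List.intersperse]
    | cons b bs =>
      have h1 : PySem.Chars.join sep (a :: b :: (bs ++ [x])) =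
          a ++ sep ++ PySem.Chars.join sep (b :: (bs ++ [x])) := by
        simp [PySem.Chars.join, List.intercalate, List.intersperse]
      have h2 : PySem.Chars.join sep (a :: b :: bs) =
          a ++ sep ++ PySem.Chars.join sep (b :: bs) := by
        simp [PySem.Chars.join, List.intercalate, List.intersperse]
      simp only [List.cons_append] at h1 ⊢
      rw [h1, h2]
      rw [show b :: (bs ++ [x]) = (b :: bs) ++ [x] from rfl, ih (by simp)]
      simp [List.append_assoc]

theorem strJoinAppend (L : List String) (x : String) (h : L ≠ []) :
    PySem.Str.join "\n" (L ++ [x]) = PySem.Str.join "\n" L ++ "\n" ++ x := by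
  apply String.toList_injective
  simp only [String.toList_append, PySem.Str.toList_join, List.map_append, List.map_cons,
    List.map_nil]
  exact charsJoinAppend "\n".toList (L.map String.toList) x.toList (by simpa using h)

theorem inner_fold_eq {tgn : List (List (String × List (Int × Int)))}
    (hi : HInv tgn (tgn.length : Int) (pvHistory tgn)) {node : Int}
    (hnode : (pvHistory tgn).contains node = true)
    (M : List Int) (hM : ∀ nb ∈ M, ((pvHistory tgn).getD node PySem.Dict.empty).contains nb = true)
    (acc : List String) (hacc : acc ≠ []) :
    M.foldl (fun out nb =>
      let times := ((pvHistory tgn).getD node PySem.Dict.empty).getD nb (0, none)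
      let line := "  - Connected to " ++ PySem.Int.toStr nb ++ " at t=" ++ PySem.Int.toStr times.1
      let line := match times.2 with
        | some r => line ++ ", disconnected at t=" ++ PySem.Int.toStr r
        | none => line
      out ++ line ++ "\n") (PySem.Str.join "\n" acc ++ "\n") =
    PySem.Str.join "\n" (M.foldl (fun out nb =>
      let a := (pvFirstAdded tgn (node, nb)).getD 0
      let line := "  - Connected to " ++ PySem.Int.toStr nb ++ " at t=" ++ PySem.Int.toStr a
      let line := match pvLastRemoved tgn (node, nb) a with
        | some r => line ++ ", disconnected at t=" ++ PySem.Int.toStr r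
        | none => line
      out ++ [line]) acc) ++ "\n" := by
  induction M generalizing acc with
  | nil => rfl
  | cons nb M ih =>
    have hnb := hM nb (List.mem_cons_self)
    have ht := times_eq hi hnb hnode
    simp only [List.foldl_cons, ht]
    rw [← strJoinAppend acc _ hacc]
    exact ih (fun nb' h' => hM nb' (List.mem_cons_of_mem _ h')) _ (by simp)

theorem outer_fold_eq {tgn : List (List (String × List (Int × Int)))}
    (hi : HInv tgn (tgn.length : Int) (pvHistory tgn))
    (N : List Int) (hN : ∀ node ∈ N, (pvHistory tgn).contains node = true)
    (acc : List String) (hacc : acc ≠ []) :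
    N.foldl (fun out node =>
      let inner := (pvHistory tgn).getD node PySem.Dict.empty
      let out := out ++ "Node " ++ PySem.Int.toStr node ++ ":\n"
      let out := (PySem.List.sorted inner.keys (fun x => x) false).foldl (fun out nb =>
        let times := inner.getD nb (0, none)
        let line := "  - Connected to " ++ PySem.Int.toStr nb ++ " at t=" ++
          PySem.Int.toStr times.1
        let line := match times.2 with
          | some r => line ++ ", disconnected at t=" ++ PySem.Int.toStr r
          | none => line
        out ++ line ++ "\n") out
      out ++ "\n") (PySem.Str.join "\n" acc ++ "\n") =
    PySem.Str.join "\n" (N.foldl (fun out node =>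
      let out := out ++ ["Node " ++ PySem.Int.toStr node ++ ":"]
      let out := (pvNbrsB tgn node).foldl (fun out nb =>
        let a := (pvFirstAdded tgn (node, nb)).getD 0
        let line := "  - Connected to " ++ PySem.Int.toStr nb ++ " at t=" ++ PySem.Int.toStr a
        let line := match pvLastRemoved tgn (node, nb) a with
          | some r => line ++ ", disconnected at t=" ++ PySem.Int.toStr r
          | none => line
        out ++ [line]) out
      out ++ [""]) acc) ++ "\n" := by
  induction N generalizing acc with
  | nil => rfl
  | cons node N ih =>
    have hnode := hN node (List.mem_cons_self)
    have hMn : ∀ nb ∈ pvNbrsB tgn node,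
        ((pvHistory tgn).getD node PySem.Dict.empty).contains nb = true := by
      intro nb hnbm
      rw [← nbrs_eq hi node] at hnbm
      exact (PySem.Dict.contains_iff_mem_keys _ _).mpr
        ((PySem.List.mem_sorted _ _ _ _).mp hnbm)
    have hline : ∀ out : String, ((out ++ "Node ") ++ PySem.Int.toStr node) ++ ":\n"
        = (out ++ (("Node " ++ PySem.Int.toStr node) ++ ":")) ++ "\n" := by
      intro out
      rw [show (":\n" : String) = ":" ++ "\n" from rfl]
      simp [String.append_assoc]
    simp only [List.foldl_cons]
    rw [nbrs_eq hi node, hline, ← strJoinAppend acc (("Node " ++ PySem.Int.toStr node) ++ ":")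
      hacc]
    rw [inner_fold_eq hi hnode (pvNbrsB tgn node) hMn _ (by simp)]
    have hne2 : ∀ (M : List Int) (acc2 : List String), acc2 ≠ [] →
        (M.foldl (fun out nb =>
          let a := (pvFirstAdded tgn (node, nb)).getD 0
          let line := "  - Connected to " ++ PySem.Int.toStr nb ++ " at t=" ++
            PySem.Int.toStr a
          let line := match pvLastRemoved tgn (node, nb) a with
            | some r => line ++ ", disconnected at t=" ++ PySem.Int.toStr r
            | none => line
          out ++ [line]) acc2) ≠ [] := by
      intro M
      induction M with
      | nil => intro acc2 h2; exact h2
      | cons x xs ihx =>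
        intro acc2 h2
        simp only [List.foldl_cons]
        exact ihx _ (by simp)
    rw [show (PySem.Str.join "\n" ((pvNbrsB tgn node).foldl (fun out nb =>
          let a := (pvFirstAdded tgn (node, nb)).getD 0
          let line := "  - Connected to " ++ PySem.Int.toStr nb ++ " at t=" ++
            PySem.Int.toStr a
          let line := match pvLastRemoved tgn (node, nb) a with
            | some r => line ++ ", disconnected at t=" ++ PySem.Int.toStr r
            | none => line
          out ++ [line]) (acc ++ [("Node " ++ PySem.Int.toStr node) ++ ":"])) ++ "\n") ++ "\n"
        = PySem.Str.join "\n" (((pvNbrsB tgn node).foldl (fun out nb =>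
          let a := (pvFirstAdded tgn (node, nb)).getD 0
          let line := "  - Connected to " ++ PySem.Int.toStr nb ++ " at t=" ++
            PySem.Int.toStr a
          let line := match pvLastRemoved tgn (node, nb) a with
            | some r => line ++ ", disconnected at t=" ++ PySem.Int.toStr r
            | none => line
          out ++ [line]) (acc ++ [("Node " ++ PySem.Int.toStr node) ++ ":"])) ++ [""]) ++ "\n"
      from by
        rw [strJoinAppend _ _ (hne2 _ _ (by simp)), String.append_empty]]
    exact ih (fun node' h' => hN node' (List.mem_cons_of_mem _ h')) _ (by simp)

-- ===== VERDICT (by name: the statement is the Claim_ definition above) =====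
theorem textual_adjacency_encoding_spec : Claim_equal_textual_adjacency_encoding := by
  intro tgn _ _
  unfold Spec_textual_adjacency_encoding
  have hi := history_inv tgn
  have hne : (["Each node's connections over time:\n"] : List String) ≠ [] := by simp
  have base : PySem.Str.join "\n" (["Each node's connections over time:\n"] : List String) ++ "\n" =
      "Each node's connections over time:\n\n" := rfl
  show textual_adjacency_encoding tgn = textual_adjacency_encoding_alt tgn
  simp only [textual_adjacency_encoding, textual_adjacency_encoding_alt]
  rw [nodes_eq hi]
  rw [← base]
  refine outer_fold_eq hi (pvNodesB tgn) ?_ _ hne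
  intro node hnode
  rw [← nodes_eq hi] at hnode
  have := (PySem.List.mem_sorted (xs := (pvHistory tgn).keys) (key := fun x => x)
    (rev := false) (x := node)).mp hnode
  exact (PySem.Dict.contains_iff_mem_keys _ _).mpr this
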